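-- pv_equiv track=rewrite | github.com/GitDip008/ds_tasks | app.py | get_recommended_fruits
-- ===== SOURCE A (Python) =====
-- def get_recommended_fruits(answers):
--     allowed_fruits = ['oranges', 'apples', 'pears', 'grapes', 'watermelon', 'lemon', 'lime']
--
--     party_on_weekends = answers.get('party_on_weekends', '').lower() == 'yes'
--     flavors_liked = answers.get('flavors_liked', '').lower()
--     texture_disliked = answers.get('texture_disliked', '').lower()
--     price_range = int(answers.get('price_range', 0))
--
--     recommended_fruits = allowed_fruits.copy()
--
--     if not party_on_weekends:
--         recommended_fruits = [fruit for fruit in recommended_fruits if fruit not in ['apples', 'pears', 'grapes', 'watermelon']]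
--     if flavors_liked == 'cider':
--         recommended_fruits = [fruit for fruit in recommended_fruits if fruit in ['apples', 'oranges', 'lemon', 'lime']]
--     elif flavors_liked == 'sweet':
--         recommended_fruits = [fruit for fruit in recommended_fruits if fruit in ['watermelon', 'oranges']]
--     elif flavors_liked == 'waterlike':
--         recommended_fruits = [fruit for fruit in recommended_fruits if fruit == 'watermelon']
--
--     if 'grapes' in recommended_fruits and 'watermelon' in recommended_fruits:
--         recommended_fruits.remove('watermelon')
--
--     if texture_disliked == 'smooth' and 'pears' in recommended_fruits:
--         recommended_fruits.remove('pears')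
--     elif texture_disliked == 'slimy':
--         slimy_fruits = ['watermelon', 'lime', 'grapes']
--         recommended_fruits = [fruit for fruit in recommended_fruits if fruit not in slimy_fruits]
--     elif texture_disliked == 'waterlike' and 'watermelon' in recommended_fruits:
--         recommended_fruits.remove('watermelon')
--
--     if price_range < 3:
--         if 'lime' in recommended_fruits:
--             recommended_fruits.remove('lime')
--         if 'watermelon' in recommended_fruits:
--             recommended_fruits.remove('watermelon')
--     elif 4 < price_range < 7:
--         if 'pears' in recommended_fruits:
--             recommended_fruits.remove('pears')
--         if 'apples' in recommended_fruits:
--             recommended_fruits.remove('apples')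
--
--     return recommended_fruits
-- ===== SOURCE B (Python) =====
-- def get_recommended_fruits(answers):
--     allowed_fruits = ['oranges', 'apples', 'pears', 'grapes', 'watermelon', 'lemon', 'lime']
--
--     party_on_weekends = answers.get('party_on_weekends', '').lower() == 'yes'
--     flavors_liked = answers.get('flavors_liked', '').lower()
--     texture_disliked = answers.get('texture_disliked', '').lower()
--     price_range = int(answers.get('price_range', 0))
--
--     # grapes survive the party and flavor filters iff:
--     grapes_present = party_on_weekends and flavors_liked not in ('cider', 'sweet', 'waterlike')
--
--     def keep(fruit):
--         if not party_on_weekends and fruit in ('apples', 'pears', 'grapes', 'watermelon'):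
--             return False
--         if flavors_liked == 'cider' and fruit not in ('apples', 'oranges', 'lemon', 'lime'):
--             return False
--         if flavors_liked == 'sweet' and fruit not in ('watermelon', 'oranges'):
--             return False
--         if flavors_liked == 'waterlike' and fruit != 'watermelon':
--             return False
--         if fruit == 'watermelon' and grapes_present:
--             return False
--         if texture_disliked == 'smooth' and fruit == 'pears':
--             return False
--         if texture_disliked == 'slimy' and fruit in ('watermelon', 'lime', 'grapes'):
--             return False
--         if texture_disliked == 'waterlike' and fruit == 'watermelon':
--             return False
--         if price_range < 3 and fruit in ('lime', 'watermelon'):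
--             return False
--         if 4 < price_range < 7 and fruit in ('pears', 'apples'):
--             return False
--         return True
--
--     return [fruit for fruit in allowed_fruits if keep(fruit)]
-- ===== Notes on version B (the rewrite author's own statement) =====
-- stated objective: simpler
-- what changed: Replaces A's sequence of in-place list rebuilds and conditional remove() calls by a single filter of the fixed allowed-fruits list under one keep-predicate, with the grapes-implies-drop-watermelon coupling captured by a flag computed once from the parsed answers.
import Mathlib
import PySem

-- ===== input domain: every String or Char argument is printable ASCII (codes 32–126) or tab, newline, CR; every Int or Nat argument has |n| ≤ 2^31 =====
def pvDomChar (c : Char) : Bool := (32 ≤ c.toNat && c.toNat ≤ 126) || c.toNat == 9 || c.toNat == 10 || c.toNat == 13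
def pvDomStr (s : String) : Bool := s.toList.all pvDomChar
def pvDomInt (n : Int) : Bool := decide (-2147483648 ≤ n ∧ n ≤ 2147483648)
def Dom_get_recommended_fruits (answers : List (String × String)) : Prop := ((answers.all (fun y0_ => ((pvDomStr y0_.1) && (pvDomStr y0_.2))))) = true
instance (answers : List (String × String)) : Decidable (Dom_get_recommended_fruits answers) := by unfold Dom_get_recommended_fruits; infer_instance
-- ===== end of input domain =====

-- B replaces A's sequence of in-place list rebuilds by one filter of the fixed fruit list
-- under a single boolean keep-predicate (objective: simpler, same cost).

-- ===== PORT A =====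
-- dict.get on the association list: first binding wins (the type convention's dict lookup)
def pyLookup (answers : List (String × String)) (k : String) : Option String :=
  (answers.find? (fun p => p.1 == k)).map (·.2)

-- int(answers.get('price_range', 0)); `none` of ofStr? = ValueError, excluded by Pre_
def pyPriceRange (answers : List (String × String)) : Int :=
  match pyLookup answers "price_range" with
  | none => 0
  | some s => (PySem.Int.ofStr? s).getD 0

-- "if v in l: l.remove(v)"
def pyRemoveIfIn (l : List String) (v : String) : List String :=
  if l.contains v then (PySem.List.remove? l v).getD l else l

-- A's pipeline after the answers have been parsed (A's code, step for step;
-- the string/price comparisons of A's branch conditions are the Bool flags, computed once by the caller)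
def fruitsA (party fcider fsweet fwater tsmooth tslimy twater p3 p47 : Bool) : List String :=
  let r : List String := ["oranges", "apples", "pears", "grapes", "watermelon", "lemon", "lime"]
  let r := if !party then r.filter (fun f => !(["apples", "pears", "grapes", "watermelon"].contains f)) else r
  let r := if fcider then r.filter (fun f => ["apples", "oranges", "lemon", "lime"].contains f)
    else if fsweet then r.filter (fun f => ["watermelon", "oranges"].contains f)
    else if fwater then r.filter (fun f => f == "watermelon")
    else r
  let r := if r.contains "grapes" && r.contains "watermelon" then (PySem.List.remove? r "watermelon").getD r else r
  let r := if tsmooth && r.contains "pears" then (PySem.List.remove? r "pears").getD r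
    else if tslimy then r.filter (fun f => !(["watermelon", "lime", "grapes"].contains f))
    else if twater && r.contains "watermelon" then (PySem.List.remove? r "watermelon").getD r
    else r
  let r := if p3 then pyRemoveIfIn (pyRemoveIfIn r "lime") "watermelon"
    else if p47 then pyRemoveIfIn (pyRemoveIfIn r "pears") "apples"
    else r
  r

def get_recommended_fruits (answers : List (String × String)) : List String :=
  let party := PySem.Str.lower ((pyLookup answers "party_on_weekends").getD "") == "yes"
  let flavors := PySem.Str.lower ((pyLookup answers "flavors_liked").getD "")
  let texture := PySem.Str.lower ((pyLookup answers "texture_disliked").getD "")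
  let price := pyPriceRange answers
  fruitsA party (flavors == "cider") (flavors == "sweet") (flavors == "waterlike")
    (texture == "smooth") (texture == "slimy") (texture == "waterlike")
    (decide (price < 3)) (decide (4 < price ∧ price < 7))

-- ===== PORT B =====
-- B's single keep-predicate over the fixed allowed-fruits list (Source B, step for step)
def keepB (party fcider fsweet fwater tsmooth tslimy twater p3 p47 : Bool)
    (grapesPresent : Bool) (fruit : String) : Bool :=
  if !party && ["apples", "pears", "grapes", "watermelon"].contains fruit then false
  else if fcider && !(["apples", "oranges", "lemon", "lime"].contains fruit) then false
  else if fsweet && !(["watermelon", "oranges"].contains fruit) then false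
  else if fwater && !(fruit == "watermelon") then false
  else if fruit == "watermelon" && grapesPresent then false
  else if tsmooth && fruit == "pears" then false
  else if tslimy && ["watermelon", "lime", "grapes"].contains fruit then false
  else if twater && fruit == "watermelon" then false
  else if p3 && ["lime", "watermelon"].contains fruit then false
  else if p47 && ["pears", "apples"].contains fruit then false
  else true

-- B's single filter of the fixed list (Source B, step for step; comparison flags computed once by the caller)
def fruitsB (party fcider fsweet fwater tsmooth tslimy twater p3 p47 : Bool) : List String :=
  let grapesPresent := party && !(fcider || fsweet || fwater)
  ["oranges", "apples", "pears", "grapes", "watermelon", "lemon", "lime"].filter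
    (keepB party fcider fsweet fwater tsmooth tslimy twater p3 p47 grapesPresent)

def get_recommended_fruits_alt (answers : List (String × String)) : List String :=
  let party := PySem.Str.lower ((pyLookup answers "party_on_weekends").getD "") == "yes"
  let flavors := PySem.Str.lower ((pyLookup answers "flavors_liked").getD "")
  let texture := PySem.Str.lower ((pyLookup answers "texture_disliked").getD "")
  let price := pyPriceRange answers
  fruitsB party (flavors == "cider") (flavors == "sweet") (flavors == "waterlike")
    (texture == "smooth") (texture == "slimy") (texture == "waterlike")
    (decide (price < 3)) (decide (4 < price ∧ price < 7))

-- ===== PRECONDITION & SPEC =====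
-- Pre_ excludes exactly the inputs where int(answers['price_range']) raises ValueError (both A and B raise there).
def Pre_get_recommended_fruits (answers : List (String × String)) : Prop :=
  (((answers.find? (fun p => p.1 == "price_range")).map
      (fun p => (PySem.Int.ofStr? p.2).isSome)).getD true) = true
instance (answers : List (String × String)) : Decidable (Pre_get_recommended_fruits answers) := by
  unfold Pre_get_recommended_fruits; infer_instance

def pvWitness_get_recommended_fruits : (List (String × String)) :=
  [("party_on_weekends", "yes"), ("flavors_liked", "sweet"), ("price_range", "5")]

def Spec_get_recommended_fruits (answers : List (String × String)) (out : List String) : Prop := out = get_recommended_fruits_alt answers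
instance (answers : List (String × String)) (out : List String) : Decidable (Spec_get_recommended_fruits answers out) := by unfold Spec_get_recommended_fruits; infer_instance

-- ===== CLAIM (what is proved, stated in full; the proofs are below) =====
def Claim_equal_get_recommended_fruits : Prop := ∀ (answers : List (String × String)), Dom_get_recommended_fruits answers → Pre_get_recommended_fruits answers → Spec_get_recommended_fruits answers (get_recommended_fruits answers)

-- ===== LEMMAS AND PROOFS =====

-- a string equals at most one of two distinct literals
theorem beq_two_false (s a b : String) (h : a ≠ b) : ((s == a) && (s == b)) = false := by
  by_cases hs : s = a
  · subst hs; simp [h]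
  · simp [hs]

-- the two pipelines agree for every combination of mutually exclusive comparison flags
theorem fruits_eq : ∀ (party fcider fsweet fwater tsmooth tslimy twater p3 p47 : Bool),
    ((fcider && fsweet) = false) → ((fcider && fwater) = false) → ((fsweet && fwater) = false) →
    ((tsmooth && tslimy) = false) → ((tsmooth && twater) = false) → ((tslimy && twater) = false) →
    ((p3 && p47) = false) →
    fruitsA party fcider fsweet fwater tsmooth tslimy twater p3 p47 =
    fruitsB party fcider fsweet fwater tsmooth tslimy twater p3 p47 := by
  decide

-- ===== VERDICT (by name: the statement is the Claim_ definition above) =====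
theorem get_recommended_fruits_spec : Claim_equal_get_recommended_fruits := by
  intro answers _ _
  unfold Spec_get_recommended_fruits get_recommended_fruits get_recommended_fruits_alt
  exact fruits_eq _ _ _ _ _ _ _ _ _
    (beq_two_false _ _ _ (by decide)) (beq_two_false _ _ _ (by decide)) (beq_two_false _ _ _ (by decide))
    (beq_two_false _ _ _ (by decide)) (beq_two_false _ _ _ (by decide)) (beq_two_false _ _ _ (by decide))
    (by simp only [Bool.and_eq_false_iff, decide_eq_false_iff_not]; omega)
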